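-- pv_equiv track=rewrite | github.com/aimreant/rcnn-labeler | tools.py | calculate_labels
-- ===== SOURCE A (Python) =====
-- def calculate_labels(label_list):
--     """
--     Get min(x,y) and max(x,y) from label_list
--     :param label_list:
--     :return: (x_min, y_min, x_max, y_max)
--     """
--     if len(label_list) == 0:
--         return 0, 0, 0, 0
--     x_min, y_min, x_max, y_max = label_list[0][1], label_list[0][2], label_list[0][3], label_list[0][4]
--     for label in label_list:
--         if label[1] < x_min:
--             x_min = label[1]
--         if label[2] < y_min:
--             y_min = label[2]
--         if label[3] > x_max:
--             x_max = label[3]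
--         if label[4] > y_max:
--             y_max = label[4]
--
--     return x_min, y_min, x_max, y_max
-- ===== SOURCE B (Python) =====
-- def calculate_labels(label_list):
--     """
--     Get min(x,y) and max(x,y) from label_list
--     :param label_list:
--     :return: (x_min, y_min, x_max, y_max)
--     """
--     if len(label_list) == 0:
--         return 0, 0, 0, 0
--
--     def bbox(lo, hi):
--         # bounding box of label_list[lo:hi], hi - lo >= 1
--         if hi - lo == 1:
--             l = label_list[lo]
--             return l[1], l[2], l[3], l[4]
--         mid = (lo + hi) // 2
--         a = bbox(lo, mid)
--         b = bbox(mid, hi)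
--         return (min(a[0], b[0]), min(a[1], b[1]),
--                 max(a[2], b[2]), max(a[3], b[3]))
--
--     return bbox(0, len(label_list))
-- ===== Notes on version B (the rewrite author's own statement) =====
-- stated objective: alternative
-- what changed: Replaces A's single fused left-to-right scan with mutable accumulators by a divide-and-conquer recursion that computes the bounding box of each half and merges the two boxes with componentwise min/max.
import Mathlib
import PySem

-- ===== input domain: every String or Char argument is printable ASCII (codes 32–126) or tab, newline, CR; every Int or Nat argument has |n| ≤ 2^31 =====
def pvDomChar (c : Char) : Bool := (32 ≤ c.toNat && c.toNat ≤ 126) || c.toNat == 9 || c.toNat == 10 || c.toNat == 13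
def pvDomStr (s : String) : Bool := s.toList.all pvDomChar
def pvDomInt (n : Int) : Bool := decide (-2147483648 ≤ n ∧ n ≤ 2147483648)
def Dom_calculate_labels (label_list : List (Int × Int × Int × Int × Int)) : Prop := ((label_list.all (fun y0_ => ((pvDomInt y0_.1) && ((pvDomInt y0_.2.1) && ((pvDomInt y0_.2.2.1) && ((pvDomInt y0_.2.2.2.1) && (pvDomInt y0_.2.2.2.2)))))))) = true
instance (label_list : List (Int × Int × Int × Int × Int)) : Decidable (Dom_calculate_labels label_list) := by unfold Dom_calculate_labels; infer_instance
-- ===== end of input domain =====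

-- B replaces A's single fused left-to-right scan (four if-guarded mutable accumulators)
-- by a divide-and-conquer recursion: the bounding box of each half, merged componentwise.

-- ===== PORT A =====
-- A's loop body: four if-guarded updates of (x_min, y_min, x_max, y_max)
def calcStep (st : Int × Int × Int × Int) (label : Int × Int × Int × Int × Int) :
    Int × Int × Int × Int :=
  let x_min := if label.2.1 < st.1 then label.2.1 else st.1
  let y_min := if label.2.2.1 < st.2.1 then label.2.2.1 else st.2.1
  let x_max := if label.2.2.2.1 > st.2.2.1 then label.2.2.2.1 else st.2.2.1
  let y_max := if label.2.2.2.2 > st.2.2.2 then label.2.2.2.2 else st.2.2.2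
  (x_min, y_min, x_max, y_max)

def calculate_labels (label_list : List (Int × Int × Int × Int × Int)) : Int × Int × Int × Int :=
  match label_list with
  | [] => (0, 0, 0, 0)
  | l0 :: _ =>
    label_list.foldl calcStep (l0.2.1, l0.2.2.1, l0.2.2.2.1, l0.2.2.2.2)

-- ===== PORT B =====
-- merge of two child bounding boxes (componentwise min/min/max/max), B's combine step
def mergeBox (a b : Int × Int × Int × Int) : Int × Int × Int × Int :=
  (min a.1 b.1, min a.2.1 b.2.1, max a.2.2.1 b.2.2.1, max a.2.2.2 b.2.2.2)

-- Python's bbox(lo, hi) works on the segment label_list[lo:hi] and splits it at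
-- mid = (lo+hi)//2, i.e. the segment's first (hi-lo)//2 elements; here the segment
-- is the list argument and the split is take/drop at length/2.
def bboxSeg (seg : List (Int × Int × Int × Int × Int)) : Int × Int × Int × Int :=
  match seg with
  | [] => (0, 0, 0, 0)  -- unreachable: only called on nonempty segments
  | [l] => (l.2.1, l.2.2.1, l.2.2.2.1, l.2.2.2.2)
  | a :: b :: t =>
    let seg := a :: b :: t
    let m := seg.length / 2
    mergeBox (bboxSeg (seg.take m)) (bboxSeg (seg.drop m))
termination_by seg.length
decreasing_by
  · simp only [List.length_take, List.length_cons]; omega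
  · simp only [List.length_drop, List.length_cons]; omega

def calculate_labels_alt (label_list : List (Int × Int × Int × Int × Int)) : Int × Int × Int × Int :=
  if label_list.length = 0 then (0, 0, 0, 0)
  else bboxSeg label_list

-- ===== PRECONDITION & SPEC =====
def Spec_calculate_labels (label_list : List (Int × Int × Int × Int × Int)) (out : Int × Int × Int × Int) : Prop := out = calculate_labels_alt label_list
instance (label_list : List (Int × Int × Int × Int × Int)) (out : Int × Int × Int × Int) : Decidable (Spec_calculate_labels label_list out) := by unfold Spec_calculate_labels; infer_instance

-- ===== CLAIM (what is proved, stated in full; the proofs are below) =====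
def Claim_equal_calculate_labels : Prop := ∀ (label_list : List (Int × Int × Int × Int × Int)), Dom_calculate_labels label_list → Spec_calculate_labels label_list (calculate_labels label_list)

-- ===== LEMMAS AND PROOFS =====

-- canonical value: componentwise fold-min / fold-max from the head
def canonBox (l0 : Int × Int × Int × Int × Int) (t : List (Int × Int × Int × Int × Int)) :
    Int × Int × Int × Int :=
  ((t.map (fun l => l.2.1)).foldl min l0.2.1,
   (t.map (fun l => l.2.2.1)).foldl min l0.2.2.1,
   (t.map (fun l => l.2.2.2.1)).foldl max l0.2.2.2.1,
   (t.map (fun l => l.2.2.2.2)).foldl max l0.2.2.2.2)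

theorem if_lt_eq_min (x a : Int) : (if x < a then x else a) = min a x := by
  split_ifs <;> omega

theorem if_gt_eq_max (x a : Int) : (if x > a then x else a) = max a x := by
  split_ifs <;> omega

-- A's fused fold equals the four componentwise folds
theorem calcStep_fold (L : List (Int × Int × Int × Int × Int)) (a b c d : Int) :
    L.foldl calcStep (a, b, c, d) =
      ((L.map (fun l => l.2.1)).foldl min a,
       (L.map (fun l => l.2.2.1)).foldl min b,
       (L.map (fun l => l.2.2.2.1)).foldl max c,
       (L.map (fun l => l.2.2.2.2)).foldl max d) := by
  induction L generalizing a b c d with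
  | nil => rfl
  | cons h t ih =>
    simp only [List.foldl_cons, List.map_cons, calcStep, if_lt_eq_min, if_gt_eq_max, ih]

theorem foldl_min_shift (l : List Int) (a b : Int) :
    l.foldl min (min a b) = min a (l.foldl min b) := by
  induction l generalizing b with
  | nil => rfl
  | cons h t ih => simp only [List.foldl_cons, min_assoc, ih]

theorem foldl_max_shift (l : List Int) (a b : Int) :
    l.foldl max (max a b) = max a (l.foldl max b) := by
  induction l generalizing b with
  | nil => rfl
  | cons h t ih => simp only [List.foldl_cons, max_assoc, ih]

-- merging the canonical boxes of two nonempty segments = canonical box of the concatenation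
theorem canonBox_append (x y : Int × Int × Int × Int × Int)
    (t s : List (Int × Int × Int × Int × Int)) :
    canonBox x (t ++ y :: s) = mergeBox (canonBox x t) (canonBox y s) := by
  simp only [canonBox, mergeBox, List.map_append, List.foldl_append, List.map_cons,
    List.foldl_cons, foldl_min_shift, foldl_max_shift]

theorem bboxSeg_eq_canon :
    ∀ (n : Nat) (l0 : Int × Int × Int × Int × Int) (t : List (Int × Int × Int × Int × Int)),
      (l0 :: t).length = n → bboxSeg (l0 :: t) = canonBox l0 t := by
  intro n
  induction n using Nat.strong_induction_on with
  | _ n ih =>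
    intro l0 t hn
    match t with
    | [] => simp [bboxSeg, canonBox]
    | b :: t' =>
      rw [bboxSeg]
      set L := l0 :: b :: t' with hL
      have hmpos : 1 ≤ L.length / 2 := by simp [hL]; omega
      have hmlt : L.length / 2 < L.length := by simp [hL]; omega
      -- decompose take and drop as nonempty lists
      have htk : L.take (L.length / 2) ≠ [] := by
        intro h
        have := congrArg List.length h
        simp [List.length_take] at this
        omega
      have hdr : L.drop (L.length / 2) ≠ [] := by
        intro h
        have := congrArg List.length h
        simp [List.length_drop] at this
        omega
      obtain ⟨x, xs, hx⟩ := List.exists_cons_of_ne_nil htk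
      obtain ⟨y, ys, hy⟩ := List.exists_cons_of_ne_nil hdr
      have hlen1 : (x :: xs).length < n := by
        rw [← hx]; rw [← hn]; simpa [List.length_take] using hmlt
      have hlen2 : (y :: ys).length < n := by
        rw [← hy, ← hn]
        have : (L.drop (L.length / 2)).length = L.length - L.length / 2 := by
          simp [List.length_drop]
        omega
      rw [hx, hy, ih _ hlen1 x xs rfl, ih _ hlen2 y ys rfl]
      have hsplit : x :: (xs ++ y :: ys) = L := by
        rw [← List.cons_append, ← hx, ← hy, List.take_append_drop]
      have hx0 : x = l0 := by
        have := congrArg (fun l => l.head?) hsplit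
        simpa [hL] using this
      rw [← canonBox_append]
      subst hx0
      have : x :: (xs ++ y :: ys) = x :: (b :: t') := by rw [hsplit, hL]
      have htail : xs ++ y :: ys = b :: t' := by
        injection this
      rw [htail]

theorem calculate_labels_spec : Claim_equal_calculate_labels := by
  intro L _
  unfold Spec_calculate_labels calculate_labels calculate_labels_alt
  cases L with
  | nil => rfl
  | cons l0 t =>
    simp only [List.length_cons, Nat.succ_ne_zero]
    rw [calcStep_fold, bboxSeg_eq_canon (l0 :: t).length l0 t rfl]
    simp [canonBox, min_self, max_self]
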